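-- pv_equiv track=rewrite | github.com/ImGeuntae/CodingTest | 프로그래머스/2/172927. 광물 캐기/광물 캐기.py | solution
-- ===== SOURCE A (Python) =====
-- def solution(picks, minerals):
--     minerals = minerals[:5*sum(picks)]
--     L = []
--     while minerals:
--         s = 0
--         for i in minerals[:min(5,len(minerals))]:
--             if i == "diamond":
--                 s += 100
--             elif i == "iron":
--                 s += 10
--             else:
--                 s += 1
--         L.append(s)
--         del minerals[0:min(5,len(minerals))]
--     answer = 0
--     for j in sorted(L, reverse=True):
--         if picks[0]:
--             answer += ((j//100) + (j%100)//10 + ((j%100)%10))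
--             picks[0] -= 1
--         elif picks[1]:
--             answer += ((j//100)*5 + (j%100)//10 + ((j%100)%10))
--             picks[1] -= 1
--         else:
--             answer += (((j//100)*25) + (((j%100)//10)*5) + ((j%100)%10))
--     return answer
-- ===== SOURCE B (Python) =====
-- def solution(picks, minerals):
--     minerals = minerals[:5*sum(picks)]
--     # one pass: tally each 5-chunk's composition (diamonds, irons, stones) in a frequency table
--     freq = {}
--     d = i = s = cnt = 0
--     for name in minerals:
--         if name == "diamond":
--             d += 1
--         elif name == "iron":
--             i += 1
--         else:
--             s += 1
--         cnt += 1
--         if cnt == 5: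
--             freq[(d, i, s)] = freq.get((d, i, s), 0) + 1
--             d = i = s = cnt = 0
--     if cnt:
--         freq[(d, i, s)] = freq.get((d, i, s), 0) + 1
--     # counting sort: visit possible compositions from most to least valuable
--     answer = 0
--     for dd in range(5, -1, -1):
--         for ii in range(5 - dd, -1, -1):
--             for ss in range(5 - dd - ii, -1, -1):
--                 for _ in range(freq.get((dd, ii, ss), 0)):
--                     if picks[0]:
--                         answer += dd + ii + ss
--                         picks[0] -= 1
--                     elif picks[1]:
--                         answer += 5*dd + ii + ss
--                         picks[1] -= 1
--                     else:
--                         answer += 25*dd + 5*ii + ss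
--     return answer
-- ===== Notes on version B (the rewrite author's own statement) =====
-- stated objective: alternative
-- what changed: B replaces A's while-loop with del-slicing, packed 100/10/1 chunk values and a reverse sort by a single tallying pass that counts each 5-chunk's (diamond, iron, stone) composition into a frequency table, then a counting-sort walk over the 56 possible compositions in decreasing value order, assigning pickaxes per composition group.
import Mathlib
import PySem

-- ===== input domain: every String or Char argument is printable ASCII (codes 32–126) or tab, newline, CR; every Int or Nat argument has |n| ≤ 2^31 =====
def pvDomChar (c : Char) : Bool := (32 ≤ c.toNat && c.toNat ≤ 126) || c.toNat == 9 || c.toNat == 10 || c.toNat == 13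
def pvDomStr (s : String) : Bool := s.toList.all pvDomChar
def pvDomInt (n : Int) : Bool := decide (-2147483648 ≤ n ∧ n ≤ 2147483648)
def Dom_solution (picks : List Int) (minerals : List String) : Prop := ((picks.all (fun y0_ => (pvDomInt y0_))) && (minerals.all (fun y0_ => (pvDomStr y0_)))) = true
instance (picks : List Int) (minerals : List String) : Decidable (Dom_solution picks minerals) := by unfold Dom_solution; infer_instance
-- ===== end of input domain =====

-- B replaces A's while/del chunking and packed-value reverse sort by a single tallying pass into a
-- frequency table of (diamond, iron, stone) chunk compositions plus a counting-sort walk over the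
-- 56 possible compositions in decreasing value order (objective: alternative algorithm, same result).
-- Both Pythons mutate the caller's `picks` list identically; the theorems are about the return value.

-- ===== PORT A =====
-- inner `for i in minerals[:min(5,len(minerals))]` accumulation
def pvChunkSum (chunk : List String) : Int :=
  chunk.foldl (fun s i => if i == "diamond" then s + 100 else if i == "iron" then s + 10 else s + 1) 0

-- `while minerals: ... L.append(s); del minerals[0:min(5,len(minerals))]`
def pvBuildL (ms : List String) : List Int :=
  if _h : ms = [] then []
  else
    pvChunkSum (PySem.List.slice ms none (some (min 5 (ms.length : Int)))) ::
      pvBuildL (PySem.List.slice ms (some (min 5 (ms.length : Int))) none)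
termination_by ms.length
decreasing_by
  rw [PySem.List.slice_from ms (by omega)]
  have : 1 ≤ ms.length := List.length_pos_of_ne_nil _h
  simp only [List.length_drop]
  omega

-- one iteration of A's assignment loop; state = (picks list, answer)
def pvAssignA (st : List Int × Int) (j : Int) : List Int × Int :=
  if PySem.List.pyGetD st.1 0 0 ≠ 0 then
    (st.1.set 0 (PySem.List.pyGetD st.1 0 0 - 1),
     st.2 + (PySem.Int.floordiv j 100 + PySem.Int.floordiv (PySem.Int.mod j 100) 10 +
             PySem.Int.mod (PySem.Int.mod j 100) 10))
  else if PySem.List.pyGetD st.1 1 0 ≠ 0 then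
    (st.1.set 1 (PySem.List.pyGetD st.1 1 0 - 1),
     st.2 + (PySem.Int.floordiv j 100 * 5 + PySem.Int.floordiv (PySem.Int.mod j 100) 10 +
             PySem.Int.mod (PySem.Int.mod j 100) 10))
  else
    (st.1, st.2 + (PySem.Int.floordiv j 100 * 25 + PySem.Int.floordiv (PySem.Int.mod j 100) 10 * 5 +
                   PySem.Int.mod (PySem.Int.mod j 100) 10))

def solution (picks : List Int) (minerals : List String) : Int :=
  let ms := PySem.List.slice minerals none (some (5 * picks.sum))
  ((PySem.List.sorted (pvBuildL ms) (fun x => x) true).foldl pvAssignA (picks, 0)).2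

-- ===== PORT B =====
-- one mineral of B's tallying pass; state = (freq, d, i, s, cnt)
def pvTallyStep (st : PySem.Dict (Int × Int × Int) Int × Int × Int × Int × Int) (name : String) :
    PySem.Dict (Int × Int × Int) Int × Int × Int × Int × Int :=
  match st with
  | (freq, d, i, s, cnt) =>
    let t : Int × Int × Int :=
      if name == "diamond" then (d + 1, i, s)
      else if name == "iron" then (d, i + 1, s)
      else (d, i, s + 1)
    if cnt + 1 == 5 then (freq.insert t (freq.getD t 0 + 1), 0, 0, 0, 0)
    else (freq, t.1, t.2.1, t.2.2, cnt + 1)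

-- the frequency table after the pass and the trailing `if cnt:` flush
def pvFreq (ms : List String) : PySem.Dict (Int × Int × Int) Int :=
  match ms.foldl pvTallyStep (PySem.Dict.empty, 0, 0, 0, 0) with
  | (freq, d, i, s, cnt) =>
    if cnt ≠ 0 then freq.insert (d, i, s) (freq.getD (d, i, s) 0 + 1) else freq

-- one pickaxe assignment for a chunk of composition c; state = (picks list, answer)
def pvAssignB (c : Int × Int × Int) (st : List Int × Int) : List Int × Int :=
  if PySem.List.pyGetD st.1 0 0 ≠ 0 then
    (st.1.set 0 (PySem.List.pyGetD st.1 0 0 - 1), st.2 + (c.1 + c.2.1 + c.2.2))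
  else if PySem.List.pyGetD st.1 1 0 ≠ 0 then
    (st.1.set 1 (PySem.List.pyGetD st.1 1 0 - 1), st.2 + (5 * c.1 + c.2.1 + c.2.2))
  else
    (st.1, st.2 + (25 * c.1 + 5 * c.2.1 + c.2.2))

def solution_alt (picks : List Int) (minerals : List String) : Int :=
  let ms := PySem.List.slice minerals none (some (5 * picks.sum))
  let freq := pvFreq ms
  ((PySem.List.pyRange 5 (-1) (-1)).foldl (fun st dd =>
    (PySem.List.pyRange (5 - dd) (-1) (-1)).foldl (fun st ii =>
      (PySem.List.pyRange (5 - dd - ii) (-1) (-1)).foldl (fun st ss =>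
        (PySem.List.pyRange 0 (freq.getD (dd, ii, ss) 0) 1).foldl
          (fun st _ => pvAssignB (dd, ii, ss) st) st) st) st) (picks, 0)).2

-- ===== PRECONDITION & SPEC =====
def Spec_solution (picks : List Int) (minerals : List String) (out : Int) : Prop := out = solution_alt picks minerals
instance (picks : List Int) (minerals : List String) (out : Int) : Decidable (Spec_solution picks minerals out) := by unfold Spec_solution; infer_instance

-- ===== CLAIM (what is proved, stated in full; the proofs are below) =====
def Claim_equal_solution : Prop := ∀ (picks : List Int) (minerals : List String), Dom_solution picks minerals → Spec_solution picks minerals (solution picks minerals)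

-- ===== LEMMAS AND PROOFS =====

-- packed value of a composition, A's chunk encoding
def pvPack (c : Int × Int × Int) : Int := 100 * c.1 + 10 * c.2.1 + c.2.2

def pvCompStep (t : Int × Int × Int) (name : String) : Int × Int × Int :=
  if name == "diamond" then (t.1 + 1, t.2.1, t.2.2)
  else if name == "iron" then (t.1, t.2.1 + 1, t.2.2)
  else (t.1, t.2.1, t.2.2 + 1)

def pvComp (chunk : List String) : Int × Int × Int := chunk.foldl pvCompStep (0, 0, 0)

def pvComps (ms : List String) : List (Int × Int × Int) :=
  if ms = [] then [] else pvComp (ms.take 5) :: pvComps (ms.drop 5)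
termination_by ms.length
decreasing_by
  rename_i h
  have : 1 ≤ ms.length := List.length_pos_of_ne_nil h
  simp only [List.length_drop]
  omega

-- the 56 candidate compositions, in B's visiting order (decreasing value)
def pvAll : List (Int × Int × Int) :=
  (PySem.List.pyRange 5 (-1) (-1)).flatMap (fun dd =>
    (PySem.List.pyRange (5 - dd) (-1) (-1)).flatMap (fun ii =>
      (PySem.List.pyRange (5 - dd - ii) (-1) (-1)).map (fun ss => (dd, ii, ss))))

def pvRange (c : Int × Int × Int) : Prop :=
  0 ≤ c.1 ∧ 0 ≤ c.2.1 ∧ 0 ≤ c.2.2 ∧ c.1 + c.2.1 + c.2.2 ≤ 5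

def pvExp (xs : List (Int × Int × Int)) : List (Int × Int × Int) :=
  pvAll.flatMap (fun c => List.replicate (xs.count c) c)

theorem pv_foldl_comp (chunk : List String) (t : Int × Int × Int) :
    chunk.foldl pvCompStep t =
      (t.1 + (pvComp chunk).1, t.2.1 + (pvComp chunk).2.1, t.2.2 + (pvComp chunk).2.2) := by
  induction chunk generalizing t with
  | nil => simp [pvComp]
  | cons x l ih =>
    simp only [List.foldl_cons, pvComp] at *
    rw [ih (pvCompStep t x), ih (pvCompStep (0,0,0) x)]
    simp [pvCompStep]
    split_ifs <;> simp <;> ring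
theorem pv_chunkSum_aux (chunk : List String) (a : Int) :
    chunk.foldl (fun s i => if i == "diamond" then s + 100 else if i == "iron" then s + 10 else s + 1) a
      = a + pvPack (pvComp chunk) := by
  induction chunk generalizing a with
  | nil => simp [pvComp, pvPack]
  | cons x l ih =>
    simp only [List.foldl_cons]
    rw [ih]
    have hc : pvComp (x :: l) = ((pvCompStep (0,0,0) x).1 + (pvComp l).1,
        (pvCompStep (0,0,0) x).2.1 + (pvComp l).2.1, (pvCompStep (0,0,0) x).2.2 + (pvComp l).2.2) := by
      simp only [pvComp, List.foldl_cons]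
      exact pv_foldl_comp l _
    rw [hc]
    simp only [pvPack, pvCompStep]
    split_ifs <;> simp <;> ring

theorem pv_chunkSum (chunk : List String) : pvChunkSum chunk = pvPack (pvComp chunk) := by
  rw [pvChunkSum, pv_chunkSum_aux]; ring
theorem pv_comp_bounds (chunk : List String) :
    0 ≤ (pvComp chunk).1 ∧ 0 ≤ (pvComp chunk).2.1 ∧ 0 ≤ (pvComp chunk).2.2 ∧
      (pvComp chunk).1 + (pvComp chunk).2.1 + (pvComp chunk).2.2 = chunk.length := by
  induction chunk with
  | nil => simp [pvComp]
  | cons x l ih =>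
    have hc := pv_foldl_comp l (pvCompStep (0,0,0) x)
    simp only [pvComp, List.foldl_cons] at *
    rw [hc]
    simp only [pvCompStep, List.length_cons]
    split_ifs <;> simp <;> omega
theorem pv_take_min (xs : List String) : xs.take (min 5 xs.length) = xs.take 5 := by
  by_cases h : xs.length ≤ 5
  · simp [List.take_of_length_le, h]
  · simp [min_eq_left (le_of_not_ge h)]

theorem pv_drop_min (xs : List String) : xs.drop (min 5 xs.length) = xs.drop 5 := by
  by_cases h : xs.length ≤ 5
  · simp [List.drop_of_length_le, h]
  · simp [min_eq_left (le_of_not_ge h)]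

theorem pv_buildL_aux (n : Nat) : ∀ ms : List String, ms.length ≤ n → pvBuildL ms = (pvComps ms).map pvPack := by
  induction n with
  | zero =>
    intro ms h
    have : ms = [] := List.eq_nil_of_length_eq_zero (Nat.le_zero.mp h)
    subst this
    rw [pvBuildL, pvComps]; simp
  | succ n ih =>
    intro ms h
    by_cases hnil : ms = []
    · subst hnil; rw [pvBuildL, pvComps]; simp
    · rw [pvBuildL, pvComps]
      simp only [hnil, dite_false]
      have ht : (min 5 (ms.length : Int)).toNat = min 5 ms.length := by omega
      rw [PySem.List.slice_to ms (b := min 5 (ms.length : Int)) (by omega),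
          PySem.List.slice_from ms (a := min 5 (ms.length : Int)) (by omega), ht,
          pv_take_min, pv_drop_min, pv_chunkSum]
      have hlen : (ms.drop 5).length ≤ n := by
        have : 1 ≤ ms.length := List.length_pos_of_ne_nil hnil
        simp only [List.length_drop]; omega
      rw [ih _ hlen]; simp

theorem pv_buildL (ms : List String) : pvBuildL ms = (pvComps ms).map pvPack :=
  pv_buildL_aux ms.length ms le_rfl
theorem pv_comps_range_aux (n : Nat) : ∀ ms : List String, ms.length ≤ n → ∀ c ∈ pvComps ms, pvRange c := by
  induction n with
  | zero =>
    intro ms h c hc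
    have : ms = [] := List.eq_nil_of_length_eq_zero (Nat.le_zero.mp h)
    subst this; rw [pvComps] at hc; simp at hc
  | succ n ih =>
    intro ms h c hc
    by_cases hnil : ms = []
    · subst hnil; rw [pvComps] at hc; simp at hc
    · rw [pvComps] at hc
      simp only [if_neg hnil, List.mem_cons] at hc
      rcases hc with rfl | hc
      · have hb := pv_comp_bounds (ms.take 5)
        have hl : (ms.take 5).length ≤ 5 := by simp
        exact ⟨hb.1, hb.2.1, hb.2.2.1, by rw [hb.2.2.2]; exact_mod_cast hl⟩
      · have : 1 ≤ ms.length := List.length_pos_of_ne_nil hnil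
        exact ih (ms.drop 5) (by simp only [List.length_drop]; omega) c hc

theorem pv_comps_range (ms : List String) : ∀ c ∈ pvComps ms, pvRange c :=
  pv_comps_range_aux ms.length ms le_rfl

theorem pv_mem_pvAll_of_range (c : Int × Int × Int) (h : pvRange c) : c ∈ pvAll := by
  obtain ⟨d, i, s⟩ := c
  obtain ⟨h1, h2, h3, h4⟩ := h
  simp only [] at h1 h2 h3 h4
  simp only [pvAll, List.mem_flatMap, List.mem_map, PySem.List.mem_pyRange_neg_one]
  exact ⟨d, by omega, i, by omega, s, by omega, rfl⟩
theorem pv_tally_chunk (chunk : List String) :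
    ∀ (freq : PySem.Dict (Int × Int × Int) Int) (d i s cnt : Int),
      0 ≤ cnt → cnt + chunk.length ≤ 5 → cnt ≤ 4 →
      chunk.foldl pvTallyStep (freq, d, i, s, cnt) =
        (if cnt + chunk.length = 5 then
          (freq.insert (d + (pvComp chunk).1, i + (pvComp chunk).2.1, s + (pvComp chunk).2.2)
            (freq.getD (d + (pvComp chunk).1, i + (pvComp chunk).2.1, s + (pvComp chunk).2.2) 0 + 1),
           0, 0, 0, 0)
        else (freq, d + (pvComp chunk).1, i + (pvComp chunk).2.1, s + (pvComp chunk).2.2,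
              cnt + chunk.length)) := by
  induction chunk with
  | nil =>
    intro freq d i s cnt h0 h5 h4
    simp only [List.foldl_nil, List.length_nil, Nat.cast_zero, add_zero]
    rw [if_neg (by omega)]
    simp [pvComp]
  | cons x l ih =>
    intro freq d i s cnt h0 h5 h4
    have hc : pvComp (x :: l) = ((pvCompStep (0,0,0) x).1 + (pvComp l).1,
        (pvCompStep (0,0,0) x).2.1 + (pvComp l).2.1, (pvCompStep (0,0,0) x).2.2 + (pvComp l).2.2) := by
      simp only [pvComp, List.foldl_cons]; exact pv_foldl_comp l _
    simp only [List.foldl_cons, List.length_cons]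
    simp only [List.length_cons] at h5
    push_cast at h5
    push_cast
    by_cases h55 : cnt + 1 = 5
    · have hl : l = [] := by
        have : l.length = 0 := by omega
        exact List.eq_nil_of_length_eq_zero this
      subst hl
      have hb : (cnt + 1 == 5) = true := by simp [h55]
      simp only [pvTallyStep, hb, if_true, List.foldl_nil, List.length_nil,
        Nat.cast_zero, zero_add]
      rw [if_pos h55, hc]
      simp only [pvComp, List.foldl_nil, pvCompStep]
      split_ifs <;> simp
    · have hb : (cnt + 1 == 5) = false := by simp [h55]
      simp only [pvTallyStep, hb, Bool.false_eq_true, if_false]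
      have hlen : (cnt + 1) + (l.length : Int) ≤ 5 := by omega
      rw [ih _ _ _ _ _ (by omega) (by omega) (by omega)]
      by_cases hfin : cnt + 1 + (l.length : Int) = 5
      · rw [if_pos (by omega : cnt + 1 + ((l.length : Nat) : Int) = 5),
            if_pos (show cnt + ((l.length : Int) + 1) = 5 by omega), hc]
        simp only [pvCompStep]
        split_ifs <;> simp <;> ring_nf
      · rw [if_neg (by omega : ¬ cnt + 1 + ((l.length : Nat) : Int) = 5),
            if_neg (show ¬ cnt + ((l.length : Int) + 1) = 5 by omega), hc]
        simp only [pvCompStep]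
        split_ifs <;> simp <;> ring_nf <;> try trivial
def pvFlush (r : PySem.Dict (Int × Int × Int) Int × Int × Int × Int × Int) :
    PySem.Dict (Int × Int × Int) Int :=
  if r.2.2.2.2 ≠ 0 then
    r.1.insert (r.2.1, r.2.2.1, r.2.2.2.1) (r.1.getD (r.2.1, r.2.2.1, r.2.2.2.1) 0 + 1)
  else r.1

theorem pv_freq_fold (n : Nat) : ∀ ms : List String, ms.length ≤ n →
    ∀ freq : PySem.Dict (Int × Int × Int) Int,
    pvFlush (ms.foldl pvTallyStep (freq, 0, 0, 0, 0)) =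
      (pvComps ms).foldl (fun f c => f.insert c (f.getD c 0 + 1)) freq := by
  induction n with
  | zero =>
    intro ms h freq
    have : ms = [] := List.eq_nil_of_length_eq_zero (Nat.le_zero.mp h)
    subst this
    rw [pvComps]
    simp [pvFlush]
  | succ n ih =>
    intro ms h freq
    by_cases hnil : ms = []
    · subst hnil; rw [pvComps]; simp [pvFlush]
    · have hpos : 1 ≤ ms.length := List.length_pos_of_ne_nil hnil
      have hsplit : ms = ms.take 5 ++ ms.drop 5 := (List.take_append_drop 5 ms).symm
      rw [pvComps, if_neg hnil]
      conv_lhs => rw [hsplit]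
      rw [List.foldl_append]
      have htake : (ms.take 5).length ≤ 5 := by simp
      rw [pv_tally_chunk (ms.take 5) freq 0 0 0 0 le_rfl (by omega) (by omega)]
      by_cases h5 : 5 ≤ ms.length
      · have hlt : ((ms.take 5).length : Int) = 5 := by simp [List.length_take]; omega
        rw [if_pos (by rw [hlt]; ring)]
        rw [ih (ms.drop 5) (by simp [List.length_drop]; omega)]
        simp
      · have hdrop : ms.drop 5 = [] := List.drop_eq_nil_of_le (by omega)
        have hlt : ((ms.take 5).length : Int) = ms.length := by simp [List.length_take]; omega
        rw [if_neg (by rw [hlt]; omega)]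
        rw [hdrop, pvComps]
        simp only [List.foldl_nil, if_true, List.foldl_cons]
        rw [pvFlush, if_pos (by simp only [hlt]; omega)]
        have : ms.take 5 = ms := List.take_of_length_le (by omega)
        rw [this]
        simp
theorem pv_freq_eq_flush (ms : List String) :
    pvFreq ms = pvFlush (ms.foldl pvTallyStep (PySem.Dict.empty, 0, 0, 0, 0)) := by
  rw [pvFreq]
  rcases ms.foldl pvTallyStep (PySem.Dict.empty, 0, 0, 0, 0) with ⟨f, d, i, s, cnt⟩
  rfl

theorem pv_freq_getD (ms : List String) (c : Int × Int × Int) :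
    (pvFreq ms).getD c 0 = ((pvComps ms).count c : Int) := by
  rw [pv_freq_eq_flush, pv_freq_fold ms.length ms le_rfl PySem.Dict.empty,
      PySem.Dict.foldl_insert_getD_add_one_eq_counter, PySem.Dict.getD_counter]
theorem pv_count_flatMap_replicate (ks : List (Int × Int × Int)) (f : (Int × Int × Int) → Nat)
    (hnd : ks.Nodup) (a : Int × Int × Int) :
    (ks.flatMap (fun c => List.replicate (f c) c)).count a = if a ∈ ks then f a else 0 := by
  induction ks with
  | nil => simp
  | cons k t ih =>
    simp only [List.flatMap_cons, List.count_append, List.count_replicate, List.mem_cons]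
    rw [ih (List.Nodup.of_cons hnd)]
    by_cases hak : a = k
    · subst hak
      have : a ∉ t := (List.nodup_cons.mp hnd).1
      simp [this]
    · simp [hak, beq_iff_eq, Ne.symm]
theorem pv_all_nodup : pvAll.Nodup := by decide

theorem pv_all_pairwise : pvAll.Pairwise (fun a b => pvPack b < pvPack a) := by decide

theorem pv_exp_perm (ms : List String) : (pvExp (pvComps ms)).Perm (pvComps ms) := by
  rw [List.perm_iff_count]
  intro a
  rw [pvExp, pv_count_flatMap_replicate _ _ pv_all_nodup]
  by_cases ha : a ∈ pvAll
  · simp [ha]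
  · rw [if_neg ha]
    have : a ∉ pvComps ms := fun hm => ha (pv_mem_pvAll_of_range a (pv_comps_range ms a hm))
    simp [List.count_eq_zero_of_not_mem this]
theorem pv_pairwise_flatMap_replicate (ks : List (Int × Int × Int)) (f : (Int × Int × Int) → Nat)
    (hp : ks.Pairwise (fun a b => pvPack b < pvPack a)) :
    (ks.flatMap (fun c => List.replicate (f c) c)).Pairwise (fun a b => pvPack b ≤ pvPack a) := by
  induction ks with
  | nil => simp
  | cons k t ih =>
    rw [List.pairwise_cons] at hp
    simp only [List.flatMap_cons]
    rw [List.pairwise_append]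
    refine ⟨?_, ih hp.2, ?_⟩
    · exact List.pairwise_replicate.mpr (Or.inr le_rfl)
    · intro a ha b hb
      have hak : a = k := (List.eq_of_mem_replicate ha)
      obtain ⟨c, hct, hbc⟩ := List.mem_flatMap.mp hb
      have hbk : b = c := List.eq_of_mem_replicate hbc
      subst hak
      subst hbk
      exact le_of_lt (hp.1 _ hct)
theorem pv_exp_pairwise (xs : List (Int × Int × Int)) :
    (pvExp xs).Pairwise (fun a b => pvPack b ≤ pvPack a) :=
  pv_pairwise_flatMap_replicate pvAll _ pv_all_pairwise
theorem pv_sorted_eq (ms : List String) :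
    PySem.List.sorted ((pvComps ms).map pvPack) (fun x => x) true = (pvExp (pvComps ms)).map pvPack := by
  have hperm : (PySem.List.sorted ((pvComps ms).map pvPack) (fun x => x) true).Perm
      ((pvExp (pvComps ms)).map pvPack) :=
    (PySem.List.sorted_perm _ _ _).trans ((pv_exp_perm ms).map pvPack).symm
  have hs1 : (PySem.List.sorted ((pvComps ms).map pvPack) (fun x => x) true).Pairwise
      (fun a b : Int => b ≤ a) := PySem.List.sorted_pairwise_rev _ _
  have hs2 : ((pvExp (pvComps ms)).map pvPack).Pairwise (fun a b : Int => b ≤ a) := by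
    rw [List.pairwise_map]
    exact pv_exp_pairwise _
  exact hperm.eq_of_pairwise (fun a b _ _ h1 h2 => le_antisymm h2 h1) hs1 hs2
theorem pv_all_range : ∀ c ∈ pvAll, pvRange c := by
  intro c hc
  simp only [pvAll, List.mem_flatMap, List.mem_map, PySem.List.mem_pyRange_neg_one] at hc
  obtain ⟨dd, hdd, ii, hii, ss, hss, rfl⟩ := hc
  unfold pvRange
  simp only []
  refine ⟨by omega, by omega, by omega, by omega⟩

theorem pv_assign_agree (c : Int × Int × Int) (h : pvRange c) (st : List Int × Int) :
    pvAssignA st (pvPack c) = pvAssignB c st := by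
  obtain ⟨h1, h2, h3, h4⟩ := h
  have hd : PySem.Int.floordiv (pvPack c) 100 = c.1 :=
    (PySem.Int.floordiv_eq_iff_of_pos (by norm_num)).mpr ⟨by unfold pvPack; omega, by unfold pvPack; omega⟩
  have hm100 : PySem.Int.mod (pvPack c) 100 = 10 * c.2.1 + c.2.2 := by
    have h0 := PySem.Int.floordiv_mul_add_mod (pvPack c) 100
    rw [hd] at h0
    unfold pvPack at h0 ⊢
    omega
  have hi' : PySem.Int.floordiv (10 * c.2.1 + c.2.2) 10 = c.2.1 :=
    (PySem.Int.floordiv_eq_iff_of_pos (by norm_num)).mpr ⟨by omega, by omega⟩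
  have hs' : PySem.Int.mod (10 * c.2.1 + c.2.2) 10 = c.2.2 := by
    have h0 := PySem.Int.floordiv_mul_add_mod (10 * c.2.1 + c.2.2) 10
    rw [hi'] at h0
    omega
  simp only [pvAssignA, pvAssignB, hd, hm100, hi', hs']
  split_ifs <;> simp [Prod.ext_iff] <;> omega

theorem pv_fold_exp (ms : List String) (st : List Int × Int) :
    ((pvExp (pvComps ms)).map pvPack).foldl pvAssignA st =
      (pvExp (pvComps ms)).foldl (fun st c => pvAssignB c st) st := by
  rw [List.foldl_map]
  apply PySem.List.foldl_congr_mem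
  intro acc x hx
  have hxall : x ∈ pvAll := by
    obtain ⟨c, hc, hxc⟩ := List.mem_flatMap.mp hx
    rw [List.eq_of_mem_replicate hxc]
    exact hc
  exact pv_assign_agree x (pv_all_range x hxall) acc
theorem pv_foldl_flatMap {α β γ : Type} (l : List α) (g : α → List γ) (f : β → γ → β) (init : β) :
    (l.flatMap g).foldl f init = l.foldl (fun st x => (g x).foldl f st) init := by
  induction l generalizing init with
  | nil => simp
  | cons x t ih => simp [List.foldl_append, ih]

theorem pv_foldl_len {α β : Type} (l : List α) (g : β → β) (init : β) :
    l.foldl (fun st _ => g st) init = g^[l.length] init := by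
  induction l generalizing init with
  | nil => simp
  | cons x t ih => simp [ih, Function.iterate_succ_apply]

theorem pv_foldl_replicate {β γ : Type} (n : Nat) (c : γ) (f : β → γ → β) (init : β) :
    (List.replicate n c).foldl f init = (fun st => f st c)^[n] init := by
  induction n generalizing init with
  | zero => simp
  | succ n ih => simp [List.replicate_succ, ih, Function.iterate_succ_apply]

theorem pv_alt_fold (picks : List Int) (ms : List String) :
    ((PySem.List.pyRange 5 (-1) (-1)).foldl (fun st dd =>
      (PySem.List.pyRange (5 - dd) (-1) (-1)).foldl (fun st ii =>
        (PySem.List.pyRange (5 - dd - ii) (-1) (-1)).foldl (fun st ss =>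
          (PySem.List.pyRange 0 ((pvFreq ms).getD (dd, ii, ss) 0) 1).foldl
            (fun st _ => pvAssignB (dd, ii, ss) st) st) st) st) (picks, 0)) =
      (pvExp (pvComps ms)).foldl (fun st c => pvAssignB c st) (picks, 0) := by
  have hinner : ∀ (c : Int × Int × Int) (st : List Int × Int),
      (PySem.List.pyRange 0 ((pvFreq ms).getD c 0) 1).foldl (fun st _ => pvAssignB c st) st =
        (List.replicate ((pvComps ms).count c) c).foldl (fun st c' => pvAssignB c' st) st := by
    intro c st
    rw [pv_foldl_len, pv_foldl_replicate, PySem.List.length_pyRange_one, pv_freq_getD]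
    simp
  simp only [hinner]
  rw [pvExp, pv_foldl_flatMap, pvAll, pv_foldl_flatMap]
  simp only [pv_foldl_flatMap, List.foldl_map]

-- ===== VERDICT (by name: the statement is the Claim_ definition above) =====
theorem solution_spec : Claim_equal_solution := by
  intro picks minerals _
  unfold Spec_solution
  simp only [solution, solution_alt]
  rw [pv_alt_fold, pv_buildL, pv_sorted_eq, pv_fold_exp]
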